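-- pv_equiv track=rewrite | github.com/MuhammadAmaan178/streamlit-app | Cryptography/module.py | take_string
-- ===== SOURCE A (Python) =====
-- codes = {" ":0,"A":1,"B":2,"C":3,"D":4,"E":5,"F":6,"G":7,"H":8,"I":9,"J":10,"K":11,"L":12,"M":13,"N":14,"O":15,"P":16,"Q":17,"R":18,"S":19,"T":20,"U":21,"V":22,"W":23,"X":24,"Y":25,"Z":26}
--
-- def take_string(msg):
--     """
--     It is used to take string that you want to encode and returns converted list which will multiply to key
--     """
--     message = []
--     # converting the string message into numeric form using above dictionary
--     for i in msg:
--         temp = codes[i]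
--         message.append(temp)
--     new_msg = []
--     # we want to convert the numeric form which is in form of list into 1x2 form
--     while len(message) % 2 != 0:
--         message.append(0)
--     else:
--         for i in range(int((len(message))/2)):
--             st = i * 2
--             end = st + 2
--             new_msg.append(message[st:end])
--     return new_msg
-- ===== SOURCE B (Python) =====
-- codes = {" ":0,"A":1,"B":2,"C":3,"D":4,"E":5,"F":6,"G":7,"H":8,"I":9,"J":10,"K":11,"L":12,"M":13,"N":14,"O":15,"P":16,"Q":17,"R":18,"S":19,"T":20,"U":21,"V":22,"W":23,"X":24,"Y":25,"Z":26}
--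
-- def take_string(msg):
--     # single pass: keep a running pair buffer, flush it into new_msg at length 2,
--     # pad the final lone value with 0
--     new_msg = []
--     buf = []
--     for ch in msg:
--         buf.append(codes[ch])
--         if len(buf) == 2:
--             new_msg.append(buf)
--             buf = []
--     if buf:
--         new_msg.append(buf + [0])
--     return new_msg
-- ===== Notes on version B (the rewrite author's own statement) =====
-- stated objective: simpler
-- what changed: Replaced A's three phases (map to numbers, while-loop padding, then index/slice pairing over range(len/2)) by one fused pass that pushes each code into a 2-slot buffer and flushes it, padding only the final lone value.
import Mathlib
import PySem

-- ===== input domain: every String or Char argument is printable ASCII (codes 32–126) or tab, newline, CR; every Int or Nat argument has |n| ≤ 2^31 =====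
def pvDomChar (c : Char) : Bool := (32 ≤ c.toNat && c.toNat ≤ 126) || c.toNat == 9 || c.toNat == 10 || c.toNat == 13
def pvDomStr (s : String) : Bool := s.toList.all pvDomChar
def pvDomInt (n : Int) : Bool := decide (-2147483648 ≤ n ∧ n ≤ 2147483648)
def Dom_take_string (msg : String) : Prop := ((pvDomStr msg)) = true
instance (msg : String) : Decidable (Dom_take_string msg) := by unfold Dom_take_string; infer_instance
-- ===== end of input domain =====

-- B fuses A's map / pad / slice phases into one buffered pass; proved equal on all letter+space inputs (Pre_ excludes inputs where both raise KeyError).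


-- ===== PORT A =====
-- the module-level dict 'codes' (shared context of both Pythons)
def pvCodes : PySem.Dict Char Int := PySem.Dict.ofList
  [(' ',0),('A',1),('B',2),('C',3),('D',4),('E',5),('F',6),('G',7),('H',8),('I',9),
   ('J',10),('K',11),('L',12),('M',13),('N',14),('O',15),('P',16),('Q',17),('R',18),('S',19),
   ('T',20),('U',21),('V',22),('W',23),('X',24),('Y',25),('Z',26)]

-- codes[i]; Python raises KeyError on a miss — those inputs are excluded by Pre_; default 0 is never reached inside Pre_
def pvLook (c : Char) : Int := (pvCodes.get? c).getD 0

def take_string (msg : String) : List (List Int) :=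
  -- for i in msg: message.append(codes[i])
  let message := msg.toList.foldl (fun acc c => acc ++ [pvLook c]) []
  -- while len(message) % 2 != 0: message.append(0)   (the loop body runs at most once: one append makes the length even)
  let message := if message.length % 2 ≠ 0 then message ++ [(0 : Int)] else message
  -- for i in range(int(len(message)/2)): new_msg.append(message[i*2 : i*2+2])
  (PySem.List.pyRange 0 ((message.length : Int) / 2) 1).foldl
    (fun nm i => nm ++ [PySem.List.slice message (some (i * 2)) (some (i * 2 + 2))]) []

-- ===== PORT B =====
def pvStepB (s : List (List Int) × List Int) (v : Int) : List (List Int) × List Int :=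
  let buf := s.2 ++ [v]
  if buf.length = 2 then (s.1 ++ [buf], []) else (s.1, buf)

def take_string_alt (msg : String) : List (List Int) :=
  let r := msg.toList.foldl (fun s c => pvStepB s (pvLook c)) ([], [])
  if r.2 ≠ [] then r.1 ++ [r.2 ++ [(0 : Int)]] else r.1

-- ===== PRECONDITION & SPEC =====
-- Pre_: every character is a key of 'codes' (space or uppercase A–Z); on any other character A (and B) raise KeyError.
def Pre_take_string (msg : String) : Prop :=
  (msg.toList.all (fun c => c == ' ' || ('A' ≤ c && c ≤ 'Z'))) = true
instance (msg : String) : Decidable (Pre_take_string msg) := by unfold Pre_take_string; infer_instance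
def pvWitness_take_string : String := "HELLO WORLD"

def Spec_take_string (msg : String) (out : List (List Int)) : Prop := out = take_string_alt msg
instance (msg : String) (out : List (List Int)) : Decidable (Spec_take_string msg out) := by unfold Spec_take_string; infer_instance

-- ===== CLAIM (what is proved, stated in full; the proofs are below) =====
def Claim_equal_take_string : Prop := ∀ (msg : String), Dom_take_string msg → Pre_take_string msg → Spec_take_string msg (take_string msg)

-- ===== LEMMAS AND PROOFS =====

-- the common pairing: both programs produce this on the code list
def pvPairs : List Int → List (List Int)
  | [] => []
  | [x] => [[x, 0]]
  | x :: y :: t => [x, y] :: pvPairs t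

theorem pvFoldl_append_map {α β : Type} (f : α → β) :
    ∀ (l : List α) (init : List β),
      l.foldl (fun acc c => acc ++ [f c]) init = init ++ l.map f := by
  intro l
  induction l with
  | nil => simp
  | cons x t ih => intro init; simp [List.foldl_cons, ih]

theorem pvPairs_pad : ∀ (m : List Int), m.length % 2 = 1 → pvPairs (m ++ [0]) = pvPairs m := by
  intro m
  induction m using pvPairs.induct with
  | case1 => simp
  | case2 x => intro _; rfl
  | case3 x y t ih =>
      intro h
      simp only [List.length_cons] at h
      have : t.length % 2 = 1 := by omega
      simp [pvPairs, ih this]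

theorem pvSlices_even : ∀ (n : ℕ) (p : List Int), p.length = 2 * n →
    (List.range n).map (fun k => (p.drop (2 * k)).take 2) = pvPairs p := by
  intro n
  induction n with
  | zero =>
      intro p hp
      have : p = [] := List.eq_nil_of_length_eq_zero (by omega)
      simp [this, pvPairs]
  | succ n ih =>
      intro p hp
      match p with
      | x :: y :: t =>
        have ht : t.length = 2 * n := by simp at hp; omega
        rw [List.range_succ_eq_map]
        simp only [List.map_cons, List.map_map]
        have htail : (List.range n).map ((fun k => ((x :: y :: t).drop (2 * k)).take 2) ∘ Nat.succ)
            = (List.range n).map (fun k => (t.drop (2 * k)).take 2) := by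
          apply List.map_congr_left
          intro k _
          simp [Function.comp, Nat.mul_succ]
        rw [htail, ih t ht]
        simp [pvPairs]

theorem pvLemB : ∀ (m : List Int) (nm : List (List Int)),
    (let r := m.foldl pvStepB (nm, []);
     if r.2 ≠ [] then r.1 ++ [r.2 ++ [(0 : Int)]] else r.1) = nm ++ pvPairs m := by
  intro m
  induction m using pvPairs.induct with
  | case1 => intro nm; simp [pvPairs]
  | case2 x => intro nm; simp [pvStepB, pvPairs]
  | case3 x y t ih =>
      intro nm
      have hstep : (x :: y :: t).foldl pvStepB (nm, []) = t.foldl pvStepB (nm ++ [[x, y]], []) := by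
        simp [List.foldl_cons, pvStepB]
      simp only [hstep]
      rw [ih (nm ++ [[x, y]])]
      simp [pvPairs]

-- A's slice phase, reduced to pvPairs on the padded list
theorem pvLemA (m : List Int) :
    (let p := if m.length % 2 ≠ 0 then m ++ [(0 : Int)] else m;
     (PySem.List.pyRange 0 ((p.length : Int) / 2) 1).foldl
       (fun nm i => nm ++ [PySem.List.slice p (some (i * 2)) (some (i * 2 + 2))]) []) = pvPairs m := by
  set p := if m.length % 2 ≠ 0 then m ++ [(0 : Int)] else m with hp
  have hpe : ∃ n, p.length = 2 * n := by
    by_cases h : m.length % 2 ≠ 0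
    · simp only [hp, if_pos h]; exact ⟨(m.length + 1) / 2, by simp; omega⟩
    · simp only [hp, if_neg h]; exact ⟨m.length / 2, by omega⟩
  obtain ⟨n, hn⟩ := hpe
  have hdiv : ((p.length : Int) / 2) = (n : Int) := by rw [hn]; push_cast; omega
  have hpairs : pvPairs p = pvPairs m := by
    by_cases h : m.length % 2 ≠ 0
    · simp only [hp, if_pos h]; exact pvPairs_pad m (by omega)
    · simp only [hp, if_neg h]
  rw [pvFoldl_append_map (fun i => PySem.List.slice p (some (i * 2)) (some (i * 2 + 2)))]
  rw [hdiv, List.nil_append, ← hpairs, ← pvSlices_even n p hn]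
  rw [PySem.List.pyRange_one, List.map_map]
  apply List.map_congr_left
  intro k _
  simp only [Function.comp, zero_add]
  have h2 : ((k : Int) * 2) = ((2 * k : ℕ) : Int) := by push_cast; ring
  rw [h2]
  have h3 := PySem.List.slice_natCast_add p (2 * k) 2
  simpa using h3

-- ===== VERDICT (by name: the statement is the Claim_ definition above) =====
theorem take_string_spec : Claim_equal_take_string := by
  intro msg _ _
  unfold Spec_take_string take_string take_string_alt
  rw [pvFoldl_append_map pvLook]
  rw [List.nil_append]
  have hB : msg.toList.foldl (fun s c => pvStepB s (pvLook c)) ([], [])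
      = (msg.toList.map pvLook).foldl pvStepB ([], []) := by
    rw [List.foldl_map]
  simp only [hB]
  rw [pvLemA (msg.toList.map pvLook), pvLemB (msg.toList.map pvLook) []]
  simp
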